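-- pv_equiv track=rewrite | github.com/egarsan176/GitLinkedIn | Python/OperacionesNumerosAleatorios.py | mostrarDigitoMasRepetido
-- ===== SOURCE A (Python) =====
-- def mostrarDigitoMasRepetido(lista):
--     terminaciones = [0,0,0,0,0,0,0,0,0,0]
--     aux = 0
--
--     for i in range(len(lista)):
--         aux = lista[i] % 10 #saco el último dígito del número
--         terminaciones[aux] +=1 #la posicion de terminaciones q coincide con el digito se incrementa
--
--     mas = terminaciones[0]
--     for i in terminaciones:
--         if i > mas:
--             mas = i #saco dentro de terminaciones cual es el mayor
--
--     pos = terminaciones.index(mas) #por si la cantidad es mayor a 9 para que no devueva 10,11...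
--                                     #saco el índice del mayor y lo devuelvo
--
--     return "El dígito en el que más números terminan es %s."%pos
-- ===== SOURCE B (Python) =====
-- def mostrarDigitoMasRepetido(lista):
--     digitos = sorted(x % 10 for x in lista)
--     best = 0
--     best_len = 0
--     cur = None
--     cur_len = 0
--     for d in digitos:
--         if d == cur:
--             cur_len += 1
--         else:
--             cur = d
--             cur_len = 1
--         if cur_len > best_len:
--             best = d
--             best_len = cur_len
--     return "El dígito en el que más números terminan es %s." % best
-- ===== Notes on version B (the rewrite author's own statement) =====
-- stated objective: alternative
-- what changed: Replaces the 10-slot frequency table plus separate max-scan and .index passes by sorting the last digits and scanning runs in one pass with a strict-improvement update (ascending order makes ties resolve to the smallest digit).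
import Mathlib
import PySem

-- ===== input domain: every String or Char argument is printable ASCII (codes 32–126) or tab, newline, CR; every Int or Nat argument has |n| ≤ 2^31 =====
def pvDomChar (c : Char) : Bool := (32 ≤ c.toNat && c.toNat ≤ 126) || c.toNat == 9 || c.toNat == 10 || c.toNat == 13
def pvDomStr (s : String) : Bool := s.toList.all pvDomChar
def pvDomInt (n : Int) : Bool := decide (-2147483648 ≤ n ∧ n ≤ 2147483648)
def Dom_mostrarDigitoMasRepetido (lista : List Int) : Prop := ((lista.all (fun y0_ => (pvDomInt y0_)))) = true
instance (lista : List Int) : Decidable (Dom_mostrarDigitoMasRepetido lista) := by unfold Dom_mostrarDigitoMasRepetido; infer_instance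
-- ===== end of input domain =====

-- B replaces A's 10-slot frequency table + max-scan + .index by sort-the-digits and a single
-- run-length scan with strict-improvement update (same result; alternative algorithm, not faster).

-- ===== PORT A =====
def mostrarDigitoMasRepetido (lista : List Int) : String :=
  let terminaciones : List Int := [0,0,0,0,0,0,0,0,0,0]
  let terminaciones :=
    (PySem.List.pyRange 0 (lista.length : Int) 1).foldl
      (fun t i =>
        let aux := PySem.Int.mod (PySem.List.pyGetD lista i 0) 10
        -- terminaciones[aux] += 1; aux = lista[i] % 10 ∈ [0,10) so the index is always in range
        PySem.List.pySetD t aux (PySem.List.pyGetD t aux 0 + 1))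
      terminaciones
  let mas := terminaciones.foldl (fun mas i => if i > mas then i else mas)
      (PySem.List.pyGetD terminaciones 0 0)
  -- terminaciones.index(mas); mas is an element of terminaciones so .index never raises
  let pos : Nat := (PySem.List.index? terminaciones mas).getD 0
  "El dígito en el que más números terminan es " ++ PySem.Int.toStr (pos : Int) ++ "."

-- ===== PORT B =====
def pvRunStep (s : Int × Int × Option Int × Int) (d : Int) : Int × Int × Option Int × Int :=
  let best := s.1
  let bestLen := s.2.1
  let cur := s.2.2.1
  let curLen := s.2.2.2
  let curLen' := if cur = some d then curLen + 1 else 1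
  if curLen' > bestLen then (d, curLen', some d, curLen')
  else (best, bestLen, some d, curLen')

def mostrarDigitoMasRepetido_alt (lista : List Int) : String :=
  let digitos := PySem.List.sorted (lista.map (fun x => PySem.Int.mod x 10)) (fun d => d) false
  let st := digitos.foldl pvRunStep (0, 0, none, 0)
  "El dígito en el que más números terminan es " ++ PySem.Int.toStr st.1 ++ "."

-- ===== PRECONDITION & SPEC =====
def Spec_mostrarDigitoMasRepetido (lista : List Int) (out : String) : Prop := out = mostrarDigitoMasRepetido_alt lista
instance (lista : List Int) (out : String) : Decidable (Spec_mostrarDigitoMasRepetido lista out) := by unfold Spec_mostrarDigitoMasRepetido; infer_instance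

-- ===== CLAIM (what is proved, stated in full; the proofs are below) =====
def Claim_equal_mostrarDigitoMasRepetido : Prop := ∀ (lista : List Int), Dom_mostrarDigitoMasRepetido lista → Spec_mostrarDigitoMasRepetido lista (mostrarDigitoMasRepetido lista)

-- ===== LEMMAS AND PROOFS =====

-- the list of last digits
def pvDs (lista : List Int) : List Int := lista.map (fun x => PySem.Int.mod x 10)

-- the common answer characterisation: k is the smallest digit index with maximal count
def pvIsAns (l : List Int) (k : Nat) : Prop :=
  k < 10 ∧ (∀ j : Nat, j < 10 → l.count (j : Int) ≤ l.count (k : Int)) ∧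
  (∀ j : Nat, j < k → l.count (j : Int) < l.count (k : Int))

def pvFmt (k : Nat) : String :=
  "El dígito en el que más números terminan es " ++ PySem.Int.toStr (k : Int) ++ "."

theorem pvIsAns_unique {l : List Int} {k k' : Nat} (h : pvIsAns l k) (h' : pvIsAns l k') :
    k = k' := by
  by_contra hne
  rcases Nat.lt_or_ge k k' with hlt | hge
  · have h1 := h'.2.2 k hlt
    have h2 := h.2.1 k' h'.1
    omega
  · have hlt : k' < k := by omega
    have h1 := h.2.2 k' hlt
    have h2 := h'.2.1 k h.1
    omega

theorem pvDs_mem {lista : List Int} {d : Int} (hd : d ∈ pvDs lista) : 0 ≤ d ∧ d < 10 := by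
  simp only [pvDs, List.mem_map] at hd
  obtain ⟨x, _, rfl⟩ := hd
  exact ⟨PySem.Int.mod_nonneg x (by norm_num), PySem.Int.mod_lt x (by norm_num)⟩

-- ---------- A side ----------

def pvStepA (t : List Int) (x : Int) : List Int :=
  let aux := PySem.Int.mod x 10
  PySem.List.pySetD t aux (PySem.List.pyGetD t aux 0 + 1)

theorem pvStepA_eq (t : List Int) (x : Int) (ht : t.length = 10) :
    pvStepA t x = t.set (PySem.Int.mod x 10).toNat
      (t.getD (PySem.Int.mod x 10).toNat 0 + 1) := by
  have h0 : 0 ≤ x % 10 := Int.emod_nonneg x (by norm_num)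
  have h1 : x % 10 < (t.length : Int) := by rw [ht]; omega
  simp [pvStepA, PySem.List.pySetD, PySem.List.pySet?, PySem.List.pyGetD, PySem.List.pyGet?,
    PySem.List.pyIdx?, h0, h1, List.getD_eq_getElem?_getD]


theorem pvTableA_len (xs : List Int) (t : List Int) (ht : t.length = 10) :
    (xs.foldl pvStepA t).length = 10 := by
  induction xs generalizing t with
  | nil => simpa using ht
  | cons x xs ih =>
    rw [List.foldl_cons]
    exact ih _ (by rw [pvStepA_eq t x ht]; simpa using ht)


theorem pvTableA_getD (xs : List Int) (t : List Int) (ht : t.length = 10) (i : Nat) (hi : i < 10) :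
    (xs.foldl pvStepA t).getD i 0 = t.getD i 0 + ((pvDs xs).count (i : Int) : Int) := by
  induction xs generalizing t with
  | nil => simp [pvDs]
  | cons x xs ih =>
    rw [List.foldl_cons, ih _ (by rw [pvStepA_eq t x ht]; simpa using ht)]
    have hmod : PySem.Int.mod x 10 = x % 10 := PySem.Int.mod_eq_emod_of_pos (by norm_num)
    have h0 : 0 ≤ x % 10 := Int.emod_nonneg x (by norm_num)
    have hset : (pvStepA t x).getD i 0
        = t.getD i 0 + (if x % 10 = (i : Int) then (1:Int) else 0) := by
      rw [pvStepA_eq t x ht, hmod]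
      have hn : (x % 10).toNat < t.length := by
        have h1 : x % 10 < 10 := by omega
        omega
      by_cases he : (x % 10).toNat = i
      · have he' : x % 10 = (i : Int) := by omega
        have hit : i < t.length := by omega
        simp [List.getD_eq_getElem?_getD, hit, he']
      · have he' : ¬ x % 10 = (i : Int) := by omega
        simp [List.getD_eq_getElem?_getD, he, he']
    rw [hset]
    simp only [pvDs, List.map_cons, List.count_cons, hmod]
    by_cases he : x % 10 = (i : Int)
    · simp [he]
      ring
    · simp [he]


theorem pvA_fmt (lista : List Int) :
    ∃ k : Nat, pvIsAns (pvDs lista) k ∧ mostrarDigitoMasRepetido lista = pvFmt k := by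
  have hA : mostrarDigitoMasRepetido lista =
      (let t := (PySem.List.pyRange 0 (lista.length : Int) 1).foldl
          (fun acc j => pvStepA acc (PySem.List.pyGetD lista j 0)) [0,0,0,0,0,0,0,0,0,0];
       let mas := t.foldl (fun m i => if i > m then i else m) (PySem.List.pyGetD t 0 0);
       let pos : Nat := (PySem.List.index? t mas).getD 0;
       "El dígito en el que más números terminan es " ++ PySem.Int.toStr (pos : Int) ++ ".") := rfl
  rw [PySem.List.foldl_pyRange_zero_pyGetD' lista 0 pvStepA] at hA
  set t := lista.foldl pvStepA [0,0,0,0,0,0,0,0,0,0] with htdef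
  have hlen : t.length = 10 := pvTableA_len _ _ (by rfl)
  have hcnt : ∀ i : Nat, i < 10 → t.getD i 0 = ((pvDs lista).count (i : Int) : Int) := by
    intro i hi
    rw [htdef, pvTableA_getD _ _ (by rfl) i hi]
    have : ([0,0,0,0,0,0,0,0,0,0] : List Int).getD i 0 = 0 := by
      interval_cases i <;> rfl
    rw [this]; ring
  have hmaxf : (fun (m i : Int) => if i > m then i else m) = fun m i => max m i := by
    funext a b; simp [max_def]; split_ifs <;> omega
  rw [hmaxf] at hA
  set M := t.foldl (fun m i => max m i) (PySem.List.pyGetD t 0 0) with hMdef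
  have hM' : M = t.foldl max (PySem.List.pyGetD t 0 0) := rfl
  have hinit_mem : PySem.List.pyGetD t 0 0 ∈ t := by
    rw [PySem.List.pyGetD_zero]
    have : t.getD 0 0 = t[0]'(by omega) := List.getD_eq_getElem t 0 (by omega)
    rw [this]; exact List.getElem_mem _
  have hMmem : M ∈ t := by
    rw [hM']
    rcases PySem.List.foldl_max_mem t (PySem.List.pyGetD t 0 0) with h | h
    · rw [h]; exact hinit_mem
    · exact h
  have hMub : ∀ y ∈ t, y ≤ M := (PySem.List.le_foldl_max t _).2
  obtain ⟨k, hk⟩ : ∃ k, PySem.List.index? t M = some k := by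
    have := (PySem.List.index?_isSome_iff t M).2 hMmem
    exact Option.isSome_iff_exists.mp this
  obtain ⟨hklt, hkval, hkmin⟩ := PySem.List.getElem_of_index?_eq_some hk
  refine ⟨k, ⟨by omega, ?_, ?_⟩, ?_⟩
  · intro j hj
    have h1 : t.getD j 0 ≤ M := hMub _ (by
      rw [List.getD_eq_getElem t 0 (by omega)]; exact List.getElem_mem _)
    have h2 : t.getD k 0 = M := by rw [List.getD_eq_getElem t 0 (by omega)]; exact hkval
    rw [hcnt j hj] at h1; rw [hcnt k (by omega)] at h2
    omega
  · intro j hj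
    have hjlt : j < 10 := by omega
    have h1 : t.getD j 0 ≤ M := hMub _ (by
      rw [List.getD_eq_getElem t 0 (by omega)]; exact List.getElem_mem _)
    have hne : t.getD j 0 ≠ M := by
      rw [List.getD_eq_getElem t 0 (by omega)]; exact hkmin j hj
    have h2 : t.getD k 0 = M := by rw [List.getD_eq_getElem t 0 (by omega)]; exact hkval
    rw [hcnt j hjlt] at h1 hne; rw [hcnt k (by omega)] at h2
    omega
  · rw [hA]
    simp only [← hMdef, hk, Option.getD_some, pvFmt]


-- ---------- B side ----------

theorem pvScanB (rest : List Int) :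
    ∀ (p : List Int) (best bestLen curLen v : Int),
    (p ++ rest).Pairwise (· ≤ ·) →
    (∀ y ∈ p, y ≤ v) → v ∈ p → ((p.count v : Nat) : Int) = curLen →
    best ∈ p → ((p.count best : Nat) : Int) = bestLen →
    (∀ u : Int, ((p.count u : Nat) : Int) ≤ bestLen) →
    (∀ u : Int, ((p.count u : Nat) : Int) = bestLen → best ≤ u) →
    (let st := rest.foldl pvRunStep (best, bestLen, some v, curLen)
     st.1 ∈ p ++ rest ∧
     (∀ u : Int, (p ++ rest).count u ≤ (p ++ rest).count st.1) ∧
     (∀ u : Int, (p ++ rest).count u = (p ++ rest).count st.1 → st.1 ≤ u)) := by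
  induction rest with
  | nil =>
    intro p best bestLen curLen v _ hple hvmem hcl hbmem hbl hmax hmin
    simp only [List.foldl_nil, List.append_nil]
    refine ⟨hbmem, ?_, ?_⟩
    · intro u
      have h1 := hmax u
      omega
    · intro u hu
      exact hmin u (by omega)
  | cons d rest ih =>
    intro p best bestLen curLen v hpw hple hvmem hcl hbmem hbl hmax hmin
    have hpw' : ((p ++ [d]) ++ rest).Pairwise (· ≤ ·) := by
      rw [List.append_assoc]; simpa using hpw
    have hp3 : ∀ a ∈ p, a ≤ d := by
      rw [List.pairwise_append] at hpw
      intro a ha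
      exact hpw.2.2 a ha d (List.mem_cons_self)
    have hbest_le_d : best ≤ d := hp3 best hbmem
    simp only [List.foldl_cons]
    by_cases hvd : v = d
    · subst hvd
      by_cases hgt : curLen + 1 > bestLen
      · have hstep : pvRunStep (best, bestLen, some v, curLen) v
            = (v, curLen + 1, some v, curLen + 1) := by
          simp [pvRunStep, hgt]
        rw [hstep]
        have key := ih (p ++ [v]) v (curLen + 1) (curLen + 1) v hpw'
          (by intro y hy; rcases List.mem_append.mp hy with h | h
              · exact hple y h
              · simp at h; omega)
          (by simp)
          (by simp [List.count_append]; omega)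
          (by simp)
          (by simp [List.count_append]; omega)
          (by intro u
              by_cases huv : u = v
              · subst huv; simp [List.count_append]; omega
              · have := hmax u
                simp [List.count_append, List.count_singleton]
                omega)
          (by intro u hu
              by_cases huv : u = v
              · omega
              · exfalso
                have := hmax u
                simp [List.count_append, List.count_singleton] at hu
                omega)
        simpa [List.append_assoc] using key
      · have hstep : pvRunStep (best, bestLen, some v, curLen) v
            = (best, bestLen, some v, curLen + 1) := by
          simp [pvRunStep, hgt]
        rw [hstep]
        have hbv : best ≠ v := by
          intro h; subst h; omega
        have key := ih (p ++ [v]) best bestLen (curLen + 1) v hpw'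
          (by intro y hy; rcases List.mem_append.mp hy with h | h
              · exact hple y h
              · simp at h; omega)
          (by simp)
          (by simp [List.count_append]; omega)
          (by simp [hbmem])
          (by simp [List.count_append, List.count_singleton]; omega)
          (by intro u
              by_cases huv : u = v
              · subst huv; simp [List.count_append]; omega
              · have := hmax u
                simp [List.count_append, List.count_singleton]
                omega)
          (by intro u hu
              by_cases huv : u = v
              · subst huv
                simp [List.count_append] at hu
                exact hple best hbmem
              · have := hmax u
                simp [List.count_append, List.count_singleton] at hu
                exact hmin u (by omega))
        simpa [List.append_assoc] using key
    · have hdnp : d ∉ p := by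
        intro hd
        exact hvd (le_antisymm (hp3 v hvmem) (hple d hd))
      have hcntd : p.count d = 0 := List.count_eq_zero.mpr hdnp
      have hbl1 : 1 ≤ bestLen := by
        have : 0 < p.count best := List.count_pos_iff.mpr hbmem
        omega
      have hstep : pvRunStep (best, bestLen, some v, curLen) d
          = (best, bestLen, some d, 1) := by
        have : ¬ ((1:Int) > bestLen) := by omega
        simp [pvRunStep, hvd, this]
      rw [hstep]
      have hbd : best ≠ d := fun h => hdnp (h ▸ hbmem)
      have key := ih (p ++ [d]) best bestLen 1 d hpw'
        (by intro y hy; rcases List.mem_append.mp hy with h | h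
            · exact hp3 y h
            · simp at h; omega)
        (by simp)
        (by simp [List.count_append, hcntd])
        (by simp [hbmem])
        (by simp [List.count_append, List.count_singleton]; omega)
        (by intro u
            by_cases hud : u = d
            · subst hud; simp [List.count_append, hcntd]; omega
            · have := hmax u
              simp [List.count_append, List.count_singleton]
              omega)
        (by intro u hu
            by_cases hud : u = d
            · subst hud; exact hbest_le_d
            · have := hmax u
              simp [List.count_append, List.count_singleton] at hu
              exact hmin u (by omega))
      simpa [List.append_assoc] using key


theorem pvB_fmt (lista : List Int) :
    ∃ k : Nat, pvIsAns (pvDs lista) k ∧ mostrarDigitoMasRepetido_alt lista = pvFmt k := by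
  have hA : mostrarDigitoMasRepetido_alt lista =
      "El dígito en el que más números terminan es " ++
        PySem.Int.toStr ((PySem.List.sorted (pvDs lista) (fun d => d) false).foldl
          pvRunStep (0, 0, none, 0)).1 ++ "." := rfl
  have hperm : (PySem.List.sorted (pvDs lista) (fun d => d) false).Perm (pvDs lista) :=
    PySem.List.sorted_perm _ _ _
  have hpw : (PySem.List.sorted (pvDs lista) (fun d => d) false).Pairwise (· ≤ ·) := by
    simpa using PySem.List.sorted_pairwise (pvDs lista) (fun d => d)
  obtain hnil | ⟨d, rest, hcons⟩ : PySem.List.sorted (pvDs lista) (fun d => d) false = [] ∨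
      ∃ d rest, PySem.List.sorted (pvDs lista) (fun d => d) false = d :: rest := by
    cases PySem.List.sorted (pvDs lista) (fun d => d) false with
    | nil => exact Or.inl rfl
    | cons a l => exact Or.inr ⟨a, l, rfl⟩
  · rw [hnil] at hperm hA
    have hds : pvDs lista = [] := hperm.symm.eq_nil
    refine ⟨0, ⟨by omega, ?_, ?_⟩, ?_⟩
    · intro j _; simp [hds]
    · intro j hj; omega
    · rw [hA]; rfl
  · rw [hcons] at hperm hA hpw
    have hstep0 : pvRunStep (0, 0, none, 0) d = (d, 1, some d, 1) := by
      simp [pvRunStep]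
    rw [List.foldl_cons, hstep0] at hA
    have key := pvScanB rest [d] d 1 1 d (by simpa using hpw)
      (by intro y hy; simp at hy; omega)
      (by simp) (by simp) (by simp) (by simp)
      (by intro u
          have : List.count u [d] ≤ 1 := by
            simpa using List.count_le_length (l := [d]) (a := u)
          omega)
      (by intro u hu
          have : u = d := by
            by_contra hne
            simp [List.count_singleton] at hu
            omega
          omega)
    simp only [List.singleton_append] at key
    obtain ⟨hmem, hmaxc, hminc⟩ := key
    set b := ((rest.foldl pvRunStep (d, 1, some d, 1)).1) with hbdef
    have hbmem : b ∈ pvDs lista := hperm.mem_iff.mp hmem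
    obtain ⟨hb0, hb10⟩ := pvDs_mem hbmem
    refine ⟨b.toNat, ⟨by omega, ?_, ?_⟩, ?_⟩
    · intro j hj
      have h := hmaxc (j : Int)
      rw [hperm.count_eq, hperm.count_eq] at h
      have hbk : ((b.toNat : Nat) : Int) = b := by omega
      rw [hbk]
      exact h
    · intro j hj
      have h := hmaxc (j : Int)
      rw [hperm.count_eq, hperm.count_eq] at h
      have hbk : ((b.toNat : Nat) : Int) = b := by omega
      rw [hbk]
      rcases Nat.lt_or_ge ((pvDs lista).count (j:Int)) ((pvDs lista).count b) with h' | h'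
      · exact h'
      · exfalso
        have heq : (d :: rest).count (j : Int) = (d :: rest).count b := by
          rw [hperm.count_eq, hperm.count_eq]; omega
        have := hminc (j : Int) heq
        omega
    · rw [hA]
      have hbk : ((b.toNat : Nat) : Int) = b := by omega
      simp only [pvFmt, hbk]


-- ===== VERDICT (by name: the statement is the Claim_ definition above) =====
theorem mostrarDigitoMasRepetido_spec : Claim_equal_mostrarDigitoMasRepetido := by
  intro lista _
  obtain ⟨k, hk, hA⟩ := pvA_fmt lista
  obtain ⟨k', hk', hB⟩ := pvB_fmt lista
  have : k = k' := pvIsAns_unique hk hk'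
  subst this
  simp [Spec_mostrarDigitoMasRepetido, hA, hB]
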